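-- pv_equiv track=rewrite | github.com/bearlike/Simple-Secrets-Manager | Engines/secrets_v2.py | to_env
-- ===== SOURCE A (Python) =====
-- def to_env(data):
--     lines = []
--     for key, value in data.items():
--         if "\n" in value:
--             return (
--                 None,
--                 f"Value for {key} contains newline; "
--                 "env format does not support it",
--                 400,
--             )
--         lines.append(f"{key}={value}")
--     return "\n".join(lines), "OK", 200
-- ===== SOURCE B (Python) =====
-- def to_env(data):
--     bad = next(((k, v) for k, v in data.items() if "\n" in v), None)
--     if bad is not None:
--         return (
--             None,
--             f"Value for {bad[0]} contains newline; "
--             "env format does not support it",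
--             400,
--         )
--     return "\n".join(f"{k}={v}" for k, v in data.items()), "OK", 200
-- ===== Notes on version B (the rewrite author's own statement) =====
-- stated objective: simpler
-- what changed: Replaces A's fused validate-and-build loop (growing an accumulator list with an early return) with two separate passes: a first-offender scan via next() over a generator, then a plain join over a formatting comprehension.
import Mathlib
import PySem

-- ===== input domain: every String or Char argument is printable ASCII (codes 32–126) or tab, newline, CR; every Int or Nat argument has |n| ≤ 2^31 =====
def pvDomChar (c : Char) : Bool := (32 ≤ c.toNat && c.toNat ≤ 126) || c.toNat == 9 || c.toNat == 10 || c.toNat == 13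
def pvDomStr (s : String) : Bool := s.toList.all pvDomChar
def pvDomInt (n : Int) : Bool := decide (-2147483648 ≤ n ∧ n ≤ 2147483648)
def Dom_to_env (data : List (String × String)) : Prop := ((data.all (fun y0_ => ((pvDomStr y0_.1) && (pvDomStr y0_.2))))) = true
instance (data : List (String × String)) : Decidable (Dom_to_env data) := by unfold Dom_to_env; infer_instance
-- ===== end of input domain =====

-- B replaces A's fused validate-and-build loop with a first-offender scan followed by a separate formatting pass (objective: simpler decomposition).

-- ===== PORT A =====
-- A's loop: accumulate formatted lines, early-return on the first value containing a newline.
def to_env_go (lines : List String) : List (String × String) → Option String × String × Int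
  | [] => (some (PySem.Str.join "\n" lines), "OK", 200)
  | (key, value) :: rest =>
    if PySem.Str.isIn "\n" value then
      (none, "Value for " ++ key ++ " contains newline; env format does not support it", 400)
    else
      to_env_go (lines ++ [key ++ "=" ++ value]) rest

def to_env (data : List (String × String)) : Option String × String × Int :=
  to_env_go [] data

-- ===== PORT B =====
def to_env_alt (data : List (String × String)) : Option String × String × Int :=
  match data.find? (fun p => PySem.Str.isIn "\n" p.2) with
  | some bad =>
      (none, "Value for " ++ bad.1 ++ " contains newline; env format does not support it", 400)
  | none =>
      (some (PySem.Str.join "\n" (data.map (fun p => p.1 ++ "=" ++ p.2))), "OK", 200)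

-- ===== PRECONDITION & SPEC =====
def Spec_to_env (data : List (String × String)) (out : Option String × String × Int) : Prop := out = to_env_alt data
instance (data : List (String × String)) (out : Option String × String × Int) : Decidable (Spec_to_env data out) := by unfold Spec_to_env; infer_instance

-- ===== CLAIM (what is proved, stated in full; the proofs are below) =====
def Claim_equal_to_env : Prop := ∀ (data : List (String × String)), Dom_to_env data → Spec_to_env data (to_env data)

-- ===== LEMMAS AND PROOFS =====

-- Loop invariant: A's accumulator loop equals "first offender, else join of (pending lines ++ formatted rest)".
theorem to_env_go_eq (data : List (String × String)) :
    ∀ lines : List String,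
      to_env_go lines data =
        match data.find? (fun p => PySem.Str.isIn "\n" p.2) with
        | some bad =>
            (none, "Value for " ++ bad.1 ++ " contains newline; env format does not support it", 400)
        | none =>
            (some (PySem.Str.join "\n" (lines ++ data.map (fun p => p.1 ++ "=" ++ p.2))), "OK", 200) := by
  induction data with
  | nil => intro lines; simp [to_env_go]
  | cons hd tl ih =>
    intro lines
    obtain ⟨key, value⟩ := hd
    by_cases h : PySem.Str.isIn "\n" value = true
    all_goals simp only [Bool.not_eq_true, PySem.Str.isIn,
      show ("\n" : String).toList = ['\n'] by decide] at h
    · simp [to_env_go, PySem.Str.isIn, h, List.find?]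
    · simp [to_env_go, PySem.Str.isIn, h, List.find?, ih]

-- ===== VERDICT (by name: the statement is the Claim_ definition above) =====
theorem to_env_spec : Claim_equal_to_env := by
  intro data _
  unfold Spec_to_env to_env to_env_alt
  simpa using to_env_go_eq data []
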